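-- pv_equiv track=rewrite | github.com/yannismate/webrtc-bench | analysis_old/timing-graphs.py | compute_packetnr
-- ===== SOURCE A (Python) =====
-- def compute_packetnr(seq, wrap=2**16):
--     pkt = [0]
--     for prev, curr in zip(seq[:-1], seq[1:]):
--         if curr > prev:
--             diff = curr - prev
--         else:
--             diff = curr + wrap - prev
--         pkt.append(pkt[-1] + diff)
--     return pkt
-- ===== SOURCE B (Python) =====
-- def compute_packetnr(seq, wrap=2**16):
--     pkt = [0]
--     wraps = 0
--     for prev, curr in zip(seq, seq[1:]):
--         if curr <= prev:
--             wraps += 1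
--         pkt.append(curr - seq[0] + wrap * wraps)
--     return pkt
-- ===== Notes on version B (the rewrite author's own statement) =====
-- stated objective: alternative
-- what changed: Replaces A's running accumulation pkt[-1]+diff with a wrap counter and the telescoping closed form curr - seq[0] + wrap*wraps, so each entry is computed from the current element and the wrap count instead of the previous sum.
import Mathlib
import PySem

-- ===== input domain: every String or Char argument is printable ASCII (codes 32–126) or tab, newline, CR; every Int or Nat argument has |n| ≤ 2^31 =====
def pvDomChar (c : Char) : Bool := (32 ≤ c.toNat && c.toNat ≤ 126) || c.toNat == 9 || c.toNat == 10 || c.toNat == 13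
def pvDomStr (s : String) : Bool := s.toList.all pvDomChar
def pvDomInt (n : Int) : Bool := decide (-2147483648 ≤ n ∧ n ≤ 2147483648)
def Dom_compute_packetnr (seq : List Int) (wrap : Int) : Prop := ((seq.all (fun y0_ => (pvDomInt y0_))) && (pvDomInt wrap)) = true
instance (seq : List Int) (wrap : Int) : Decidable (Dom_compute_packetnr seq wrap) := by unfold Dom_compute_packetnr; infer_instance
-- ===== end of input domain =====

-- B replaces A's running accumulation pkt[-1]+diff by a wrap counter and the closed form
-- curr - seq[0] + wrap*wraps (telescoping); same cost, different decomposition (objective: alternative).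

-- ===== PORT A =====
def compute_packetnr (seq : List Int) (wrap : Int) : List Int :=
  (List.zip (PySem.List.slice seq none (some (-1))) (PySem.List.slice seq (some 1) none)).foldl
    (fun pkt pc =>
      let diff := if pc.2 > pc.1 then pc.2 - pc.1 else pc.2 + wrap - pc.1
      pkt ++ [PySem.List.pyGetD pkt (-1) 0 + diff])
    [0]

-- ===== PORT B =====
def compute_packetnr_alt (seq : List Int) (wrap : Int) : List Int :=
  ((List.zip seq (PySem.List.slice seq (some 1) none)).foldl
    (fun st pc =>
      let wraps := if pc.2 ≤ pc.1 then st.1 + 1 else st.1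
      (wraps, st.2 ++ [pc.2 - PySem.List.pyGetD seq 0 0 + wrap * wraps]))
    ((0 : Int), [(0 : Int)])).2

-- ===== PRECONDITION & SPEC =====
def Spec_compute_packetnr (seq : List Int) (wrap : Int) (out : List Int) : Prop := out = compute_packetnr_alt seq wrap
instance (seq : List Int) (wrap : Int) (out : List Int) : Decidable (Spec_compute_packetnr seq wrap out) := by unfold Spec_compute_packetnr; infer_instance

-- ===== CLAIM (what is proved, stated in full; the proofs are below) =====
def Claim_equal_compute_packetnr : Prop := ∀ (seq : List Int) (wrap : Int), Dom_compute_packetnr seq wrap → Spec_compute_packetnr seq wrap (compute_packetnr seq wrap)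

-- ===== LEMMAS AND PROOFS =====

-- The two folds over the chain of adjacent pairs, with generalized state; the invariant
-- acc = prev - s0 + wrap * w links A's running total to B's wrap counter.
theorem pv_chain (wrap s0 : Int) (rest : List Int) :
    ∀ (prev acc w : Int) (pkt : List Int), acc = prev - s0 + wrap * w →
    List.foldl
      (fun pkt pc =>
        let diff := if pc.2 > pc.1 then pc.2 - pc.1 else pc.2 + wrap - pc.1
        pkt ++ [PySem.List.pyGetD pkt (-1) 0 + diff])
      (pkt ++ [acc]) (List.zip ((prev :: rest).dropLast) rest)
    = (List.foldl
        (fun st pc =>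
          let wraps := if pc.2 ≤ pc.1 then st.1 + 1 else st.1
          (wraps, st.2 ++ [pc.2 - s0 + wrap * wraps]))
        (w, pkt ++ [acc]) (List.zip (prev :: rest) rest)).2 := by
  induction rest with
  | nil => intro prev acc w pkt _; rfl
  | cons c r ih =>
    intro prev acc w pkt hinv
    simp only [List.dropLast, List.zip_cons_cons, List.foldl_cons]
    by_cases h : c > prev
    · have h2 : ¬ (c ≤ prev) := by omega
      simp only [h, h2, if_pos, if_false,
        PySem.List.pyGetD_neg_one_append_singleton]
      have heq : c - s0 + wrap * w = acc + (c - prev) := by rw [hinv]; ring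
      rw [heq]
      exact ih c (acc + (c - prev)) w (pkt ++ [acc]) (by rw [hinv]; ring)
    · have h2 : c ≤ prev := by omega
      simp only [h, h2, if_pos, if_false,
        PySem.List.pyGetD_neg_one_append_singleton]
      have heq : c - s0 + wrap * (w + 1) = acc + (c + wrap - prev) := by rw [hinv]; ring
      rw [heq]
      exact ih c (acc + (c + wrap - prev)) (w + 1) (pkt ++ [acc]) (by rw [hinv]; ring)

-- ===== VERDICT (by name: the statement is the Claim_ definition above) =====
theorem compute_packetnr_spec : Claim_equal_compute_packetnr := by
  intro seq wrap _
  unfold Spec_compute_packetnr compute_packetnr compute_packetnr_alt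
  cases seq with
  | nil => rfl
  | cons s0 rest =>
    rw [PySem.List.slice_to_neg_one, PySem.List.slice_from_one]
    have := pv_chain wrap s0 rest s0 0 0 [] (by ring)
    simpa using this
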